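-- pv_equiv track=rewrite | github.com/cowboydaniel/Outback-CommandCore | HackAttack/modules/authentication_testing.py | _has_pattern
-- ===== SOURCE A (Python) =====
-- def _has_pattern(pin: str) -> bool:
--     """Check if PIN forms a pattern on a keypad (e.g., 1478, 2580)."""
--     if len(pin) < 3:
--         return False
--
--     # Common keypad patterns
--     keypad = [
--         '123', '456', '789', '147', '258', '369', '159', '357',
--         '321', '654', '987', '741', '852', '963', '951', '753'
--     ]
--
--     # Check for any 3+ digit pattern
--     for i in range(len(pin) - 2):
--         if pin[i:i+3] in keypad:
--             return True
--
--     return False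
-- ===== SOURCE B (Python) =====
-- def _has_pattern(pin: str) -> bool:
--     """Check if PIN forms a pattern on a keypad (e.g., 1478, 2580)."""
--     keypad = frozenset((
--         '123', '456', '789', '147', '258', '369', '159', '357',
--         '321', '654', '987', '741', '852', '963', '951', '753'
--     ))
--     s = pin
--     while len(s) >= 3:
--         if s[:3] in keypad:
--             return True
--         s = s[1:]
--     return False
-- ===== Notes on version B (the rewrite author's own statement) =====
-- stated objective: alternative
-- what changed: A slides an index over range(len(pin)-2) and looks each slice pin[i:i+3] up in a list; B repeatedly peels the leading character off a shrinking suffix, testing only the current 3-char prefix against a frozenset until the suffix is shorter than 3 - a suffix-recursion (head-drop loop) instead of index arithmetic over the whole string, with no short-pin early return.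
import Mathlib
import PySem

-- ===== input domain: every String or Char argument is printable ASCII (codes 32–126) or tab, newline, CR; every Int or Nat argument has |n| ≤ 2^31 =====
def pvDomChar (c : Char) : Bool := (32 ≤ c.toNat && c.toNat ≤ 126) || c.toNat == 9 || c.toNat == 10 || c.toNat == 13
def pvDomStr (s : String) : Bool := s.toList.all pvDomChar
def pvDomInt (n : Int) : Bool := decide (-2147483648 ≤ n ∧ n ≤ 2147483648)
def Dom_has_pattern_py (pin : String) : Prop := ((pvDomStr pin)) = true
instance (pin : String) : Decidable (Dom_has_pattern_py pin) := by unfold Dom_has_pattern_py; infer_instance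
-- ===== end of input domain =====

-- B replaces A's indexed sliding-window-and-list-lookup with a head-drop recursion on a
-- shrinking suffix testing its 3-char prefix against a frozenset (alternative structure; same result).


-- ===== PORT A =====
-- A's keypad table: a Python list
def pvKeypad : List String :=
  ["123", "456", "789", "147", "258", "369", "159", "357",
   "321", "654", "987", "741", "852", "963", "951", "753"]

def has_pattern_py (pin : String) : Bool :=
  if PySem.Str.len pin < 3 then false
  else
    (PySem.List.pyRange 0 (PySem.Str.len pin - 2) 1).any
      (fun i => pvKeypad.contains (PySem.Str.slice pin (some i) (some (i + 3))))

-- ===== PORT B =====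
-- B's keypad table: a Python frozenset
def pvKeypadSet : PySem.Set String :=
  PySem.Set.ofList
    ["123", "456", "789", "147", "258", "369", "159", "357",
     "321", "654", "987", "741", "852", "963", "951", "753"]

-- the while loop: peel the leading char off the suffix until it is shorter than 3
def pvScan : List Char → Bool
  | c1 :: c2 :: c3 :: rest =>
      if PySem.Set.contains pvKeypadSet (String.ofList [c1, c2, c3]) then true
      else pvScan (c2 :: c3 :: rest)
  | _ => false

def has_pattern_py_alt (pin : String) : Bool := pvScan pin.toList

-- ===== PRECONDITION & SPEC =====
def Spec_has_pattern_py (pin : String) (out : Bool) : Prop := out = has_pattern_py_alt pin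
instance (pin : String) (out : Bool) : Decidable (Spec_has_pattern_py pin out) := by unfold Spec_has_pattern_py; infer_instance

-- ===== CLAIM (what is proved, stated in full; the proofs are below) =====
def Claim_equal_has_pattern_py : Prop := ∀ (pin : String), Dom_has_pattern_py pin → Spec_has_pattern_py pin (has_pattern_py pin)

-- ===== LEMMAS AND PROOFS =====

-- every keypad pattern has exactly 3 characters
lemma pvKeypad_len3 : ∀ p ∈ pvKeypad, p.toList.length = 3 := by decide

-- B's frozenset holds exactly the members of A's list
lemma mem_pvKeypadSet (x : String) : PySem.Set.contains pvKeypadSet x = true ↔ x ∈ pvKeypad := by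
  unfold pvKeypadSet pvKeypad
  rw [PySem.Set.contains_iff, PySem.Set.mem_ofList]

-- a 3-element list is an infix of s iff it appears as a window s[i:i+3] with 0 ≤ i < |s| - 2
lemma window_iff_infix (p s : List Char) (hp : p.length = 3) :
    (∃ i : Int, (0 ≤ i ∧ i < (s.length : Int) - 2) ∧
      PySem.List.slice s (some i) (some (i + 3)) = p) ↔ p <:+: s := by
  constructor
  · rintro ⟨i, ⟨h0, hlt⟩, hsl⟩
    rw [PySem.List.slice_toNat s h0 (by omega)] at hsl
    have h3 : (i + 3).toNat - i.toNat = 3 := by omega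
    rw [h3] at hsl
    exact List.IsInfix.trans (hsl ▸ ((s.drop i.toNat).take_prefix 3).isInfix)
      (s.drop_suffix i.toNat).isInfix
  · rintro ⟨t, u, rfl⟩
    refine ⟨(t.length : Int), ⟨by positivity, by simp; omega⟩, ?_⟩
    have : ((t.length : Int) + 3) = ((t.length + 3 : Nat) : Int) := by push_cast; ring
    rw [this, PySem.List.slice_natCast]
    simp [hp]

-- the head-drop scan finds exactly the keypad patterns occurring as infixes
lemma pvScan_iff (s : List Char) : pvScan s = true ↔ ∃ p ∈ pvKeypad, p.toList <:+: s := by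
  fun_induction pvScan s with
  | case1 c1 c2 c3 rest hc =>
      simp only [true_iff]
      exact ⟨String.ofList [c1, c2, c3], (mem_pvKeypadSet _).mp hc,
        ⟨[], rest, by simp⟩⟩
  | case2 c1 c2 c3 rest hc ih =>
      rw [ih]
      constructor
      · rintro ⟨p, hp, hinf⟩
        exact ⟨p, hp, hinf.trans ⟨[c1], [], by simp⟩⟩
      · rintro ⟨p, hp, hinf⟩
        rcases List.infix_cons_iff.mp hinf with hpre | hinf'
        · exfalso
          have htake := List.prefix_iff_eq_take.mp hpre
          rw [pvKeypad_len3 p hp] at htake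
          simp only [List.take] at htake
          apply hc
          rw [(mem_pvKeypadSet _)]
          have hstr : String.ofList [c1, c2, c3] = p :=
            String.ext_iff.mpr (by simp [htake])
          rw [hstr]; exact hp
        · exact ⟨p, hp, hinf'⟩
  | case3 s h =>
      -- s matched the catch-all arm: it has fewer than 3 elements, too short for any infix of length 3
      simp only [Bool.false_eq_true, false_iff]
      rintro ⟨p, hp, hinf⟩
      have hle := hinf.length_le
      rw [pvKeypad_len3 p hp] at hle
      have hlt : s.length < 3 := by
        rcases s with _ | ⟨a, _ | ⟨b, _ | ⟨c, t⟩⟩⟩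
        · simp
        · simp
        · simp
        · exact absurd rfl (h a b c t)
      omega

-- the two ports agree on every string
lemma ports_agree (pin : String) : has_pattern_py pin = has_pattern_py_alt pin := by
  rw [Bool.eq_iff_iff]
  unfold has_pattern_py has_pattern_py_alt
  rw [pvScan_iff]
  split_ifs with h
  · simp only [false_iff]
    rintro ⟨p, hp, hinf⟩
    have := hinf.length_le
    rw [pvKeypad_len3 p hp] at this
    simp [PySem.Str.len_eq] at h
    rw [String.length_toList] at this
    omega
  · simp only [List.any_eq_true, PySem.List.mem_pyRange_one, List.contains_iff_mem]
    constructor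
    · rintro ⟨i, hi, hmem⟩
      refine ⟨_, hmem, ?_⟩
      rw [← window_iff_infix _ _ (pvKeypad_len3 _ hmem)]
      refine ⟨i, ?_, ?_⟩
      · simpa [PySem.Str.len_eq, String.length_toList] using hi
      · simp [PySem.Str.toList_slice]
    · rintro ⟨p, hp, hinf⟩
      rw [← window_iff_infix _ _ (pvKeypad_len3 _ hp)] at hinf
      obtain ⟨i, hi, hsl⟩ := hinf
      refine ⟨i, by simpa [PySem.Str.len_eq, String.length_toList] using hi, ?_⟩
      have : PySem.Str.slice pin (some i) (some (i + 3)) = p := by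
        apply String.ext_iff.mpr
        simpa [PySem.Str.toList_slice] using hsl
      rw [this]; exact hp

-- ===== VERDICT (by name: the statement is the Claim_ definition above) =====
theorem has_pattern_py_spec : Claim_equal_has_pattern_py := by
  intro pin _
  unfold Spec_has_pattern_py
  exact ports_agree pin
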